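-- pv_equiv track=rewrite | github.com/matekadlicsko/Open-AML-Engine | Examples/example03_HamiltonianCycles.py | petersen_graph_adjacency
-- ===== SOURCE A (Python) =====
-- def petersen_graph_adjacency(n: int, k: int) -> list[list[int]]:
--     """
--     Build the adjacency matrix the Petersen graph G(n, k).
--     When n is congruent with 3 modulo 6, it has exactly 3 Hamiltonian cycles.
--     Hard to find even for small sizes.
--     Note that k must be less than n / 2, so the first such graph is G(9, 2).
--
--     Ref: https://en.wikipedia.org/wiki/Generalized_Petersen_graph
--     """
--
--     # Best visualized drawn with the spectral layout `pos=nx.spectral_layout(G)`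
--     assert k < n / 2, "k must be less than n / 2"
--     num_vertices = 2 * n
--     adjacency_matrix = [[0] * num_vertices for _ in range(num_vertices)]
--
--     for index in range(n):
--         # first condition
--         adjacency_matrix[index][(index + 1) % n] = 1
--         adjacency_matrix[(index + 1) % n][index] = 1
--
--         # second condition
--         adjacency_matrix[index][index + n] = 1
--         adjacency_matrix[index + n][index] = 1
--
--         # third condition
--         adjacency_matrix[n + index][n + ((index + k) % n)] = 1
--         adjacency_matrix[n + ((index + k) % n)][n + index] = 1
--
--     return adjacency_matrix
-- ===== SOURCE B (Python) =====
-- def petersen_graph_adjacency(n: int, k: int) -> list[list[int]]: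
--     """Edge-set formulation: collect all directed edge pairs once, then fill
--     the dense matrix by membership."""
--     assert k < n / 2, "k must be less than n / 2"
--     edges = set()
--     for index in range(n):
--         edges.add((index, (index + 1) % n))
--         edges.add(((index + 1) % n, index))
--         edges.add((index, index + n))
--         edges.add((index + n, index))
--         edges.add((n + index, n + (index + k) % n))
--         edges.add((n + (index + k) % n, n + index))
--     num_vertices = 2 * n
--     return [[1 if (i, j) in edges else 0 for j in range(num_vertices)]
--             for i in range(num_vertices)]
-- ===== Notes on version B (the rewrite author's own statement) =====
-- stated objective: alternative
-- what changed: A scatter-writes 1s into a preallocated zero matrix; B first collects the set of directed edge pairs and then builds the matrix densely by a membership test per cell.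
import Mathlib
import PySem

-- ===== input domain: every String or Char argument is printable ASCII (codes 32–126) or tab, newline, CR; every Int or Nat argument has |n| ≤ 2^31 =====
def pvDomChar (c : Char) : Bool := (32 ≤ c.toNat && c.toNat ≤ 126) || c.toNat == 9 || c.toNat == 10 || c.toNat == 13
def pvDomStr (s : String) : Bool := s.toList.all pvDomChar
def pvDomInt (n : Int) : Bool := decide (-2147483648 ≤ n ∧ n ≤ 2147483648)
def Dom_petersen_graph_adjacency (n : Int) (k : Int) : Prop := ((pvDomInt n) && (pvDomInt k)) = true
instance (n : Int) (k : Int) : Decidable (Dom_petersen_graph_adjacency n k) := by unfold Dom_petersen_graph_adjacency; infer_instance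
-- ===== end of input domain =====

-- B replaces A's scatter-writes into a preallocated zero matrix by an explicit edge set
-- plus a dense membership scan over every cell (objective: alternative decomposition).


-- ===== PORT A =====
-- `m[index1][index2] = 1` (Python item assignment); exact here: under Pre_ every index
-- A writes to is in range (and for n ≤ 0 the loop never runs), so the total forms are exact
def pvWrite (m : List (List Int)) (i j : Int) : List (List Int) :=
  PySem.List.pySetD m i (PySem.List.pySetD (PySem.List.pyGetD m i []) j 1)

-- the body of A's `for index in range(n)` loop: the six writes done for one `index`
def pvStepA (n k : Int) (m : List (List Int)) (index : Int) : List (List Int) :=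
  let m1 := pvWrite m index (PySem.Int.mod (index + 1) n)
  let m2 := pvWrite m1 (PySem.Int.mod (index + 1) n) index
  let m3 := pvWrite m2 index (index + n)
  let m4 := pvWrite m3 (index + n) index
  let m5 := pvWrite m4 (n + index) (n + PySem.Int.mod (index + k) n)
  pvWrite m5 (n + PySem.Int.mod (index + k) n) (n + index)

def petersen_graph_adjacency (n : Int) (k : Int) : List (List Int) :=
  let numVertices := 2 * n
  -- [[0] * num_vertices for _ in range(num_vertices)]
  let adjacencyMatrix := (PySem.List.pyRange 0 numVertices 1).map
      (fun _ => List.replicate numVertices.toNat (0 : Int))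
  (PySem.List.pyRange 0 n 1).foldl (pvStepA n k) adjacencyMatrix

-- ===== PORT B =====
-- the body of B's `for index in range(n)` loop: the six edges.add calls for one `index`
def pvStepB (n k : Int) (s : PySem.Set (Int × Int)) (index : Int) : PySem.Set (Int × Int) :=
  let s1 := PySem.Set.add s (index, PySem.Int.mod (index + 1) n)
  let s2 := PySem.Set.add s1 (PySem.Int.mod (index + 1) n, index)
  let s3 := PySem.Set.add s2 (index, index + n)
  let s4 := PySem.Set.add s3 (index + n, index)
  let s5 := PySem.Set.add s4 (n + index, n + PySem.Int.mod (index + k) n)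
  PySem.Set.add s5 (n + PySem.Int.mod (index + k) n, n + index)

def petersen_graph_adjacency_alt (n : Int) (k : Int) : List (List Int) :=
  let edges := (PySem.List.pyRange 0 n 1).foldl (pvStepB n k) PySem.Set.empty
  let numVertices := 2 * n
  (PySem.List.pyRange 0 numVertices 1).map (fun i =>
    (PySem.List.pyRange 0 numVertices 1).map (fun j =>
      if PySem.Set.contains edges (i, j) then (1 : Int) else 0))

-- ===== PRECONDITION & SPEC =====
-- A's `assert k < n / 2` (Python true division; for ints in Dom exactly 2*k < n):
-- Pre_ excludes only the inputs on which A raises AssertionError.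
def Pre_petersen_graph_adjacency (n : Int) (k : Int) : Prop := 2 * k < n
instance (n : Int) (k : Int) : Decidable (Pre_petersen_graph_adjacency n k) := by unfold Pre_petersen_graph_adjacency; infer_instance
def pvWitness_petersen_graph_adjacency : Int × Int := (9, 2)

def Spec_petersen_graph_adjacency (n : Int) (k : Int) (out : List (List Int)) : Prop := out = petersen_graph_adjacency_alt n k
instance (n : Int) (k : Int) (out : List (List Int)) : Decidable (Spec_petersen_graph_adjacency n k out) := by unfold Spec_petersen_graph_adjacency; infer_instance

-- ===== CLAIM (what is proved, stated in full; the proofs are below) =====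
def Claim_equal_petersen_graph_adjacency : Prop := ∀ (n : Int) (k : Int), Dom_petersen_graph_adjacency n k → Pre_petersen_graph_adjacency n k → Spec_petersen_graph_adjacency n k (petersen_graph_adjacency n k)

-- ===== LEMMAS AND PROOFS =====

-- the six directed pairs touched for one value of `index` (shared by both loop characterisations)
def pvSix (n k index : Int) : List (Int × Int) :=
  [(index, PySem.Int.mod (index + 1) n), (PySem.Int.mod (index + 1) n, index),
   (index, index + n), (index + n, index),
   (n + index, n + PySem.Int.mod (index + k) n), (n + PySem.Int.mod (index + k) n, n + index)]

-- entry of a matrix, as an Option (none = out of range)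
def pvEnt (m : List (List Int)) (a b : Nat) : Option Int := m[a]?.bind (fun r => r[b]?)

theorem pvEnt_write (m : List (List Int)) (i j : Int) (hi : 0 ≤ i) (hj : 0 ≤ j) (a b : Nat) :
    pvEnt (pvWrite m i j) a b =
      if (a : Int) = i ∧ (b : Int) = j then (pvEnt m a b).map (fun _ => (1 : Int)) else pvEnt m a b := by
  have hi' := Int.toNat_of_nonneg hi
  have hj' := Int.toNat_of_nonneg hj
  simp only [pvWrite, PySem.List.pySetD_of_nonneg _ _ hi, PySem.List.pySetD_of_nonneg _ _ hj,
    PySem.List.pyGetD_of_nonneg _ _ hi, pvEnt, List.getElem?_set]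
  by_cases hai : i.toNat = a
  · by_cases hlen : i.toNat < m.length
    · rw [if_pos hai, if_pos hlen]
      have hm : m[a]? = some m[i.toNat] := by
        subst hai; exact List.getElem?_eq_getElem hlen
      rw [hm]
      simp only [Option.bind_some]
      have hg : m.getD i.toNat [] = m[i.toNat] := List.getD_eq_getElem m [] hlen
      rw [hg, List.getElem?_set]
      by_cases hbj : j.toNat = b
      · by_cases hrl : j.toNat < m[i.toNat].length
        · rw [if_pos hbj, if_pos hrl, if_pos (⟨by omega, by omega⟩ : (↑a:Int) = i ∧ (↑b:Int) = j)]
          have h5 : m[i.toNat][b]? = some (m[i.toNat][b]) := by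
            subst hbj; exact List.getElem?_eq_getElem hrl
          simp [h5]
        · rw [if_pos hbj, if_neg hrl, if_pos (⟨by omega, by omega⟩ : (↑a:Int) = i ∧ (↑b:Int) = j)]
          have h5 : m[i.toNat][b]? = none := by
            subst hbj; exact List.getElem?_eq_none (by omega)
          simp [h5]
      · rw [if_neg hbj, if_neg (by rintro ⟨h1, h2⟩; exact hbj (by omega))]
    · rw [if_pos hai, if_neg hlen]
      have hm : m[a]? = none := by subst hai; exact List.getElem?_eq_none (by omega)
      rw [hm]
      split_ifs <;> simp
  · rw [if_neg hai, if_neg (by rintro ⟨h1, h2⟩; exact hai (by omega))]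

theorem pvEnt_write_acc {m m0 : List (List Int)} {P : Prop} [Decidable P] (i j : Int)
    (hi : 0 ≤ i) (hj : 0 ≤ j) (a b : Nat)
    (hm : pvEnt m a b = if P then (pvEnt m0 a b).map (fun _ => (1 : Int)) else pvEnt m0 a b) :
    pvEnt (pvWrite m i j) a b =
      if ((a : Int) = i ∧ (b : Int) = j) ∨ P
      then (pvEnt m0 a b).map (fun _ => (1 : Int)) else pvEnt m0 a b := by
  rw [pvEnt_write m i j hi hj a b, hm]
  by_cases h1 : (a : Int) = i ∧ (b : Int) = j <;> by_cases h2 : P <;>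
    rcases pvEnt m0 a b with _ | v <;> simp [h1, h2]

set_option maxHeartbeats 1000000 in
theorem pvEnt_stepA (n k idx : Int) (h0 : 0 ≤ idx) (h1 : idx < n) (m : List (List Int)) (a b : Nat) :
    pvEnt (pvStepA n k m idx) a b =
      if ((a : Int), (b : Int)) ∈ pvSix n k idx
      then (pvEnt m a b).map (fun _ => (1 : Int)) else pvEnt m a b := by
  have hn : (0 : Int) < n := by omega
  have e1 : 0 ≤ PySem.Int.mod (idx + 1) n := PySem.Int.mod_nonneg _ hn
  have e2 : 0 ≤ PySem.Int.mod (idx + k) n := PySem.Int.mod_nonneg _ hn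
  have h₀ : pvEnt m a b = if False then (pvEnt m a b).map (fun _ => (1 : Int)) else pvEnt m a b := by
    simp
  have h₁ := pvEnt_write_acc idx (PySem.Int.mod (idx + 1) n) h0 e1 a b h₀
  have h₂ := pvEnt_write_acc (PySem.Int.mod (idx + 1) n) idx e1 h0 a b h₁
  have h₃ := pvEnt_write_acc idx (idx + n) h0 (by omega) a b h₂
  have h₄ := pvEnt_write_acc (idx + n) idx (by omega) h0 a b h₃
  have h₅ := pvEnt_write_acc (n + idx) (n + PySem.Int.mod (idx + k) n) (by omega) (by omega) a b h₄
  have h₆ := pvEnt_write_acc (n + PySem.Int.mod (idx + k) n) (n + idx) (by omega) (by omega) a b h₅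
  show pvEnt (pvWrite (pvWrite (pvWrite (pvWrite (pvWrite (pvWrite m idx (PySem.Int.mod (idx + 1) n)) (PySem.Int.mod (idx + 1) n) idx) idx (idx + n)) (idx + n) idx) (n + idx) (n + PySem.Int.mod (idx + k) n)) (n + PySem.Int.mod (idx + k) n) (n + idx)) a b = _
  rw [h₆]
  refine if_congr ?_ rfl rfl
  simp only [pvSix, List.mem_cons, List.not_mem_nil, or_false, Prod.mk.injEq]
  tauto

theorem pvEnt_foldA (n k : Int) (L : List Int) (h : ∀ x ∈ L, 0 ≤ x ∧ x < n)
    (m : List (List Int)) (a b : Nat) :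
    pvEnt (L.foldl (pvStepA n k) m) a b =
      if ∃ idx ∈ L, ((a : Int), (b : Int)) ∈ pvSix n k idx
      then (pvEnt m a b).map (fun _ => (1 : Int)) else pvEnt m a b := by
  induction L generalizing m with
  | nil => simp
  | cons x L ih =>
    simp only [List.foldl_cons]
    rw [ih (fun y hy => h y (List.mem_cons_of_mem _ hy)),
        pvEnt_stepA n k x (h x List.mem_cons_self).1 (h x List.mem_cons_self).2]
    by_cases hx : ((a : Int), (b : Int)) ∈ pvSix n k x <;>
      by_cases hL : ∃ idx ∈ L, ((a : Int), (b : Int)) ∈ pvSix n k idx <;>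
      rcases hme : pvEnt m a b with _ | v <;>
      simp [hx, hL, List.mem_cons]

theorem mem_foldB (n k : Int) (L : List Int) (s : PySem.Set (Int × Int)) (p : Int × Int) :
    p ∈ L.foldl (pvStepB n k) s ↔ p ∈ s ∨ ∃ idx ∈ L, p ∈ pvSix n k idx := by
  induction L generalizing s with
  | nil => simp
  | cons x L ih =>
    simp only [List.foldl_cons]
    rw [ih]
    have hstep : p ∈ pvStepB n k s x ↔ p ∈ s ∨ p ∈ pvSix n k x := by
      simp only [pvStepB, PySem.Set.mem_add, pvSix, List.mem_cons, List.not_mem_nil]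
      tauto
    rw [hstep]
    simp only [List.mem_cons]
    constructor
    · rintro (((hs | hx) | ⟨i, hi, hp⟩))
      · exact Or.inl hs
      · exact Or.inr ⟨x, Or.inl rfl, hx⟩
      · exact Or.inr ⟨i, Or.inr hi, hp⟩
    · rintro (hs | ⟨i, (rfl | hi), hp⟩)
      · exact Or.inl (Or.inl hs)
      · exact Or.inl (Or.inr hp)
      · exact Or.inr ⟨i, hi, hp⟩

theorem pvShape_write (m : List (List Int)) (i j : Int) (hi : 0 ≤ i) :
    (pvWrite m i j).map List.length = m.map List.length := by
  simp only [pvWrite, PySem.List.pySetD_of_nonneg _ _ hi, List.map_set]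
  by_cases hlen : i.toNat < m.length
  · have hlen' : i.toNat < (m.map List.length).length := by simpa using hlen
    have : (PySem.List.pySetD (PySem.List.pyGetD m i []) j 1).length = (m.map List.length)[i.toNat]'hlen' := by
      rw [PySem.List.length_pySetD, PySem.List.pyGetD_of_nonneg _ _ hi,
        List.getD_eq_getElem m [] hlen, List.getElem_map]
    rw [this, List.set_getElem_self]
  · exact List.set_eq_of_length_le (by simpa using Nat.le_of_not_lt hlen)

theorem pvShape_foldA (n k : Int) (L : List Int) (h : ∀ x ∈ L, 0 ≤ x ∧ x < n)
    (m : List (List Int)) :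
    (L.foldl (pvStepA n k) m).map List.length = m.map List.length := by
  induction L generalizing m with
  | nil => rfl
  | cons x L ih =>
    have hx := h x List.mem_cons_self
    have hn : (0 : Int) < n := by omega
    have e1 : 0 ≤ PySem.Int.mod (x + 1) n := PySem.Int.mod_nonneg _ hn
    have e2 : 0 ≤ PySem.Int.mod (x + k) n := PySem.Int.mod_nonneg _ hn
    simp only [List.foldl_cons]
    rw [ih (fun y hy => h y (List.mem_cons_of_mem _ hy))]
    show (pvWrite (pvWrite (pvWrite (pvWrite (pvWrite (pvWrite m x (PySem.Int.mod (x + 1) n)) (PySem.Int.mod (x + 1) n) x) x (x + n)) (x + n) x) (n + x) (n + PySem.Int.mod (x + k) n)) (n + PySem.Int.mod (x + k) n) (n + x)).map List.length = _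
    rw [pvShape_write _ _ _ (by omega), pvShape_write _ _ _ (by omega),
        pvShape_write _ _ _ (by omega), pvShape_write _ _ _ (by omega),
        pvShape_write _ _ _ e1, pvShape_write _ _ _ hx.1]

-- ===== VERDICT (by name: the statement is the Claim_ definition above) =====
set_option maxHeartbeats 1000000 in
theorem petersen_graph_adjacency_spec : Claim_equal_petersen_graph_adjacency := by
  intro n k _ _
  unfold Spec_petersen_graph_adjacency
  have hL : ∀ x ∈ PySem.List.pyRange 0 n 1, 0 ≤ x ∧ x < n := by
    intro x hx
    have := PySem.List.mem_pyRange_one.mp hx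
    omega
  set N : Int := 2 * n with hN
  set m0 : List (List Int) := (PySem.List.pyRange 0 N 1).map
      (fun _ => List.replicate N.toNat (0 : Int)) with hm0
  have hm0len : m0.length = N.toNat := by
    simp [hm0, PySem.List.length_pyRange_one]
  have hshape : (petersen_graph_adjacency n k).map List.length = m0.map List.length :=
    pvShape_foldA n k _ hL m0
  have hAlen : (petersen_graph_adjacency n k).length = N.toNat := by
    have := congrArg List.length hshape
    simpa [hm0len] using this
  apply List.ext_getElem
  · simp only [petersen_graph_adjacency_alt, List.length_map, PySem.List.length_pyRange_one, hAlen]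
    omega
  · intro a ha ha'
    have haN : a < N.toNat := by rwa [hAlen] at ha
    have hrowlen : (petersen_graph_adjacency n k)[a].length = N.toNat := by
      have h1 : ((petersen_graph_adjacency n k).map List.length)[a]'(by simpa [hAlen] using haN) =
          (m0.map List.length)[a]'(by simpa [hm0len] using haN) := by
        simp only [hshape]
      simpa [hm0, List.getElem_map] using h1
    apply List.ext_getElem
    · simp only [hrowlen, petersen_graph_adjacency_alt, List.getElem_map, List.length_map,
        PySem.List.length_pyRange_one]
      omega
    · intro b hb hb'
      have hbN : b < N.toNat := by rwa [hrowlen] at hb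
      -- A-side entry
      have hEntA : pvEnt (petersen_graph_adjacency n k) a b =
          some ((petersen_graph_adjacency n k)[a][b]) := by
        simp [pvEnt, ha, hb]
      have hm0ent : pvEnt m0 a b = some 0 := by
        simp [pvEnt, hm0, hbN, PySem.List.length_pyRange_one, haN]
      have hfold := pvEnt_foldA n k (PySem.List.pyRange 0 n 1) hL m0 a b
      have hA : (petersen_graph_adjacency n k)[a][b] =
          if ∃ idx ∈ PySem.List.pyRange 0 n 1, ((a : Int), (b : Int)) ∈ pvSix n k idx
          then 1 else 0 := by
        have : pvEnt (petersen_graph_adjacency n k) a b =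
            if ∃ idx ∈ PySem.List.pyRange 0 n 1, ((a : Int), (b : Int)) ∈ pvSix n k idx
            then some 1 else some 0 := by
          rw [show pvEnt (petersen_graph_adjacency n k) a b =
              pvEnt ((PySem.List.pyRange 0 n 1).foldl (pvStepA n k) m0) a b from rfl, hfold, hm0ent]
          split_ifs <;> rfl
        rw [hEntA] at this
        split_ifs at this ⊢ <;> simpa using this
      -- B-side entry
      have hB : ((petersen_graph_adjacency_alt n k)[a]'ha')[b]'hb' =
          if PySem.Set.contains ((PySem.List.pyRange 0 n 1).foldl (pvStepB n k) PySem.Set.empty)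
              ((0 : Int) + (a : Int), (0 : Int) + (b : Int)) then 1 else 0 := by
        simp [petersen_graph_adjacency_alt, List.getElem_map, PySem.List.getElem_pyRange_one]
      rw [hA, hB]
      have hmem : ((0 : Int) + (a : Int), (0 : Int) + (b : Int)) ∈
            (PySem.List.pyRange 0 n 1).foldl (pvStepB n k) PySem.Set.empty ↔
          ∃ idx ∈ PySem.List.pyRange 0 n 1, ((a : Int), (b : Int)) ∈ pvSix n k idx := by
        rw [mem_foldB]
        simp [PySem.Set.empty]
      by_cases hE : ∃ idx ∈ PySem.List.pyRange 0 n 1, ((a : Int), (b : Int)) ∈ pvSix n k idx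
      · rw [if_pos hE, if_pos ((PySem.Set.contains_iff _ _).mpr (hmem.mpr hE))]
      · rw [if_neg hE, if_neg (by
          intro hc
          exact hE (hmem.mp ((PySem.Set.contains_iff _ _).mp hc)))]
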